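-- pv_equiv track=rewrite | github.com/soburi/mft2014 | python/signdetector.py | color_table
-- ===== SOURCE A (Python) =====
-- def color_table(x):
--     r=0
--     g=0
--     b=0
--
--     for i in range(0,x):
--         if i%3 == 0:
--             r += 64
--         elif i%3 == 1:
--             g += 64
--         else:
--             b += 64
--
--     return (b%255,g%255,r%255)
-- ===== SOURCE B (Python) =====
-- def color_table(x):
--     # Closed form: each residue class of indices in range(0, x) has a
--     # ceiling-division count; each index bumps its channel by a fixed step.
--     n = x if x > 0 else 0
--     return (64 * (n // 3) % 255,
--             64 * ((n + 1) // 3) % 255,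
--             64 * ((n + 2) // 3) % 255)
-- ===== Notes on version B (the rewrite author's own statement) =====
-- stated objective: faster
-- what changed: Replaced the linear counting loop with closed-form ceiling-division residue counts, each scaled and reduced by the final modulus once.
import Mathlib
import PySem

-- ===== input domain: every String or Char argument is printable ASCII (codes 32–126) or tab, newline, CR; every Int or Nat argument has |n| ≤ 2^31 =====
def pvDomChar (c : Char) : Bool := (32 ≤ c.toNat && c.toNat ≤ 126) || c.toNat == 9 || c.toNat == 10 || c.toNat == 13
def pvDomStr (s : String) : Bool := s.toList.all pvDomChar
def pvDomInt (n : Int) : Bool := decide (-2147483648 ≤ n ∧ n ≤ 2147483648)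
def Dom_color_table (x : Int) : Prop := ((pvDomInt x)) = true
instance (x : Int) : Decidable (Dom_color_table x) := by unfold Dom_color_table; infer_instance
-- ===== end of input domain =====

-- B replaces A's O(x) counting loop by closed-form residue counts (O(1)); return-value equivalence proved on all Int inputs.


-- ===== PORT A =====
-- loop body of A: the if/elif/else over i % 3 updating (r, g, b)
def ctStep (s : Int × Int × Int) (i : Int) : Int × Int × Int :=
  if PySem.Int.mod i 3 = 0 then (s.1 + 64, s.2.1, s.2.2)
  else if PySem.Int.mod i 3 = 1 then (s.1, s.2.1 + 64, s.2.2)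
  else (s.1, s.2.1, s.2.2 + 64)

def color_table (x : Int) : List Int :=
  let s := (PySem.List.pyRange 0 x 1).foldl ctStep (0, 0, 0)
  [PySem.Int.mod s.2.2 255, PySem.Int.mod s.2.1 255, PySem.Int.mod s.1 255]

-- ===== PORT B =====
def color_table_alt (x : Int) : List Int :=
  let n := if x > 0 then x else 0
  [PySem.Int.mod (64 * PySem.Int.floordiv n 3) 255,
   PySem.Int.mod (64 * PySem.Int.floordiv (n + 1) 3) 255,
   PySem.Int.mod (64 * PySem.Int.floordiv (n + 2) 3) 255]

-- ===== PRECONDITION & SPEC =====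
def Spec_color_table (x : Int) (out : List Int) : Prop := out = color_table_alt x
instance (x : Int) (out : List Int) : Decidable (Spec_color_table x out) := by unfold Spec_color_table; infer_instance

-- ===== CLAIM (what is proved, stated in full; the proofs are below) =====
def Claim_equal_color_table : Prop := ∀ (x : Int), Dom_color_table x → Spec_color_table x (color_table x)

-- ===== LEMMAS AND PROOFS =====

-- A's loop over range(0, n) counts the residues of i % 3 and scales by 64.
lemma ct_loop (n : Nat) :
    (PySem.List.pyRange 0 (n : Int) 1).foldl ctStep (0, 0, 0) =
      (64 * (((n + 2) / 3 : Nat) : Int), 64 * (((n + 1) / 3 : Nat) : Int), 64 * ((n / 3 : Nat) : Int)) := by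
  induction n with
  | zero => simp [PySem.List.pyRange_one_eq_nil]
  | succ n ih =>
    have h : ((n + 1 : Nat) : Int) = (n : Int) + 1 := by push_cast; ring
    rw [h, PySem.List.pyRange_one_succ_right (by positivity), List.foldl_append, ih]
    simp only [List.foldl]
    unfold ctStep
    have hm : PySem.Int.mod (n : Int) 3 = ((n % 3 : Nat) : Int) := by
      exact_mod_cast PySem.Int.mod_natCast n 3
    rw [hm]
    have h3 : n % 3 = 0 ∨ n % 3 = 1 ∨ n % 3 = 2 := by omega
    rcases h3 with h3 | h3 | h3 <;> simp [h3, Prod.ext_iff] <;> omega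

-- ===== VERDICT (by name: the statement is the Claim_ definition above) =====
theorem color_table_spec : Claim_equal_color_table := by
  intro x _
  unfold Spec_color_table color_table color_table_alt
  rcases le_or_gt x 0 with hx | hx
  · rw [PySem.List.pyRange_one_eq_nil hx]
    have : ¬ x > 0 := by omega
    simp only [this, if_false, List.foldl]
    decide
  · have hxe : x = ((x.toNat : Nat) : Int) := (Int.toNat_of_nonneg hx.le).symm
    have hpos : x > 0 := hx
    simp only [hpos, if_true]
    rw [hxe, ct_loop]
    have hf : ∀ a : Int, PySem.Int.floordiv a 3 = a / 3 := fun a =>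
      PySem.Int.floordiv_eq_ediv_of_pos (by norm_num)
    have hm : ∀ a : Int, PySem.Int.mod a 255 = a % 255 := fun a =>
      PySem.Int.mod_eq_emod_of_pos (by norm_num)
    simp only [hf, hm, List.cons.injEq, and_true]
    refine ⟨?_, ?_, ?_⟩ <;> omega
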